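-- pv_equiv track=rewrite | github.com/surenny/KIP | blueprint/prepare_web_sources.py | strip_environment
-- ===== SOURCE A (Python) =====
-- def strip_environment(text: str, env: str, replacement: str) -> str:
--     begin = f"\\begin{{{env}}}"
--     end = f"\\end{{{env}}}"
--     out: list[str] = []
--     i = 0
--     while True:
--         j = text.find(begin, i)
--         if j == -1:
--             out.append(text[i:])
--             return "".join(out)
--         out.append(text[i:j])
--         k = text.find(end, j)
--         if k == -1:
--             raise ValueError(f"unterminated environment {env}")
--         out.append(replacement)
--         i = k + len(end)
-- ===== SOURCE B (Python) =====
-- def strip_environment(text: str, env: str, replacement: str) -> str: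
--     begin = f"\\begin{{{env}}}"
--     end = f"\\end{{{env}}}"
--     begins = [p for p in range(len(text)) if text.startswith(begin, p)]
--     ends = [p for p in range(len(text)) if text.startswith(end, p)]
--     result = ""
--     i = 0
--     for j in begins:
--         if j < i:
--             continue
--         later = [k for k in ends if j <= k]
--         if not later:
--             raise ValueError(f"unterminated environment {env}")
--         result += text[i:j] + replacement
--         i = later[0] + len(end)
--     return result + text[i:]
-- ===== Notes on version B (the rewrite author's own statement) =====
-- stated objective: alternative
-- what changed: A interleaves searching and emitting in one while-True loop of repeated str.find calls; B instead precomputes the occurrence-position lists of the begin and end markers in two staged scans and then walks the begins list, pairing each unconsumed begin with the first end at or after it, so the output pass does no string searching at all.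
import Mathlib
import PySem

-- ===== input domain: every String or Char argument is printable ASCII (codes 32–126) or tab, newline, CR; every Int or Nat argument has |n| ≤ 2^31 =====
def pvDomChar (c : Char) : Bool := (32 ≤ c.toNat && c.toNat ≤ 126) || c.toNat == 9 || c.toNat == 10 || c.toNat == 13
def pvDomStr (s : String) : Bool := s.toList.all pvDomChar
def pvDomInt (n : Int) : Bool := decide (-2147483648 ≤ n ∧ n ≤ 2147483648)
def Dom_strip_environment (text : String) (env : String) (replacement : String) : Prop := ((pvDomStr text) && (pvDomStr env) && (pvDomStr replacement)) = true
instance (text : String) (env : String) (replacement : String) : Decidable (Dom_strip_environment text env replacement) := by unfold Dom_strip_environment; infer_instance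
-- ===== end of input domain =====

-- B replaces A's single search-as-you-go find loop by two staged occurrence scans (all positions of
-- the begin and end markers) followed by a searchless walk that pairs each unconsumed begin with the
-- first end at or after it (alternative decomposition; same cost). Return value only; no mutation.

-- ===== PORT A =====
-- while True: j = text.find(begin, i); … ; k = text.find(end, j); … ; i = k + len(end)
-- fuel (text.length + 1) only makes the recursion structural: i grows by ≥ 1 per iteration and
-- never exceeds text.length, so the fuel branch is never reached.
def stripALoop (text begin_ end_ repl : List Char) : Nat → Nat → List (List Char) → List Char
  | 0, _, out => PySem.Chars.join [] out
  | fuel+1, i, out =>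
      let j := PySem.Chars.findFrom text begin_ (i : Int)
      if j = -1 then
        PySem.Chars.join [] (out ++ [PySem.List.slice text (some (i : Int)) none])
      else
        let out1 := out ++ [PySem.List.slice text (some (i : Int)) (some j)]
        let k := PySem.Chars.findFrom text end_ j
        if k = -1 then []     -- Python: raise ValueError (outside Pre_; value irrelevant)
        else stripALoop text begin_ end_ repl fuel (k.toNat + end_.length) (out1 ++ [repl])

def strip_environment (text : String) (env : String) (replacement : String) : String :=
  let begin_ : List Char := "\\begin{".toList ++ env.toList ++ ['}']   -- f"\begin{{{env}}}"
  let end_ : List Char := "\\end{".toList ++ env.toList ++ ['}']       -- f"\end{{{env}}}"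
  String.mk (stripALoop text.toList begin_ end_ replacement.toList (text.toList.length + 1) 0 [])

-- ===== PORT B =====
-- [p for p in range(len(text)) if text.startswith(pat, p)]
-- text.startswith(pat, p) for a non-negative in-range p is exactly 'pat is a prefix of text[p:]'.
def occList (text pat : List Char) : List Nat :=
  (List.range text.length).filter (fun p => PySem.Chars.startswith (text.drop p) pat)

-- for j in begins: skip if j < i; later = [k for k in ends if j <= k]; raise if empty;
-- result += text[i:j] + replacement; i = later[0] + len(end)   — then return result + text[i:]
def stripBGo (text end_ repl : List Char) (ends : List Nat) : List Nat → Nat → List Char → List Char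
  | [], i, result => result ++ text.drop i
  | j :: bs, i, result =>
      if j < i then stripBGo text end_ repl ends bs i result
      else
        match ends.filter (fun k => j ≤ k) with
        | [] => []           -- Python: raise ValueError (outside Pre_; value irrelevant)
        | k :: _ => stripBGo text end_ repl ends bs (k + end_.length)
            (result ++ PySem.List.slice text (some (i : Int)) (some (j : Int)) ++ repl)

def strip_environment_alt (text : String) (env : String) (replacement : String) : String :=
  let begin_ : List Char := "\\begin{".toList ++ env.toList ++ ['}']
  let end_ : List Char := "\\end{".toList ++ env.toList ++ ['}']
  String.mk (stripBGo text.toList end_ replacement.toList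
    (occList text.toList end_) (occList text.toList begin_) 0 [])

-- ===== PRECONDITION & SPEC =====
-- Pre_ excludes the inputs on which A raises ValueError (an unterminated environment): it requires
-- the last occurrence of "\end{env}" to be at or after the last occurrence of "\begin{env}".  For
-- degenerate env values whose \end-string overlaps the \begin-string A can still return on an input
-- violating this (B returns the same value there); see the cite in claim.json.
def Pre_strip_environment (text : String) (env : String) (replacement : String) : Prop :=
  PySem.Chars.rfind text.toList ("\\begin{".toList ++ env.toList ++ ['}'])
    ≤ PySem.Chars.rfind text.toList ("\\end{".toList ++ env.toList ++ ['}'])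
instance (text : String) (env : String) (replacement : String) : Decidable (Pre_strip_environment text env replacement) := by unfold Pre_strip_environment; infer_instance

def pvWitness_strip_environment : String × String × String :=
  ("a\\begin{x}b\\end{x}c", "x", "(removed)")

def Spec_strip_environment (text : String) (env : String) (replacement : String) (out : String) : Prop := out = strip_environment_alt text env replacement
instance (text : String) (env : String) (replacement : String) (out : String) : Decidable (Spec_strip_environment text env replacement out) := by unfold Spec_strip_environment; infer_instance

-- ===== CLAIM (what is proved, stated in full; the proofs are below) =====
def Claim_equal_strip_environment : Prop := ∀ (text : String) (env : String) (replacement : String), Dom_strip_environment text env replacement → Pre_strip_environment text env replacement → Spec_strip_environment text env replacement (strip_environment text env replacement)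

-- ===== LEMMAS AND PROOFS =====

-- "".join of a list of pieces is their concatenation.
theorem joinNil_eq_flatten (l : List (List Char)) :
    PySem.Chars.join [] l = l.flatten := by
  induction l with
  | nil => rfl
  | cons a t ih =>
    simp only [PySem.Chars.join, List.intercalate] at *
    cases t <;> simp_all [List.intersperse]

-- occList is strictly increasing (it filters List.range).
theorem occList_pairwise (text pat : List Char) : (occList text pat).Pairwise (· < ·) :=
  (List.pairwise_lt_range).filter _

-- membership in occList
theorem mem_occList {text pat : List Char} {p : Nat} :
    p ∈ occList text pat ↔ p < text.length ∧ pat <+: text.drop p := by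
  simp [occList, PySem.Chars.startswith_iff]

-- in a strictly increasing list the minimum is the head
theorem head_of_min {l : List Nat} {m : Nat} (hs : l.Pairwise (· < ·))
    (hm : m ∈ l) (hmin : ∀ p ∈ l, m ≤ p) : ∃ t, l = m :: t := by
  cases l with
  | nil => cases hm
  | cons a t =>
    rcases List.mem_cons.mp hm with h | h
    · exact ⟨t, by rw [h]⟩
    · have : a < m := (List.pairwise_cons.mp hs).1 m h
      have : m ≤ a := hmin a (List.mem_cons_self)
      omega

-- The bridge between the two algorithms: text.find(pat, i)'s relative form find(text[i:], pat)
-- is determined by the head of the filtered occurrence list.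
theorem find_occ (text pat : List Char) (hp : pat ≠ []) (i : Nat) :
    PySem.Chars.find (text.drop i) pat =
      match (occList text pat).filter (fun p => i ≤ p) with
      | [] => -1
      | m :: _ => (m : Int) - i := by
  by_cases hf : PySem.Chars.find (text.drop i) pat = -1
  · have hno : ¬ pat <:+: text.drop i := (PySem.Chars.find_eq_neg_one_iff _ _).mp hf
    have hnil : (occList text pat).filter (fun p => i ≤ p) = [] := by
      rw [List.filter_eq_nil_iff]
      intro p hpmem hip
      obtain ⟨hplen, hpre⟩ := mem_occList.mp hpmem
      have hile : i ≤ p := by simpa using hip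
      have hpre2 : pat <+: (text.drop i).drop (p - i) := by
        rw [List.drop_drop, show i + (p - i) = p from by omega]; exact hpre
      exact hno ((PySem.Chars.isIn_iff_infix _ _).mp
        ((PySem.Chars.exists_prefix_drop_iff_isIn pat (text.drop i)).mp ⟨_, hpre2⟩))
    rw [hf, hnil]
  · have h0 : 0 ≤ PySem.Chars.find (text.drop i) pat := by
      have := PySem.Chars.neg_one_le_find (text.drop i) pat; omega
    obtain ⟨q, hq⟩ : ∃ q : ℕ, PySem.Chars.find (text.drop i) pat = (q : Int) :=
      ⟨_, (Int.toNat_of_nonneg h0).symm⟩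
    obtain ⟨hpre, hmin⟩ := PySem.Chars.find_spec (s := text.drop i) (sub := pat) h0
    rw [hq] at hpre hmin
    simp only [Int.toNat_natCast] at hpre hmin
    have hdropeq : (text.drop i).drop q = text.drop (i + q) := by
      rw [List.drop_drop]
    have hlen : i + q < text.length := by
      by_contra h
      have h : text.length ≤ i + q := by omega
      have hz : (text.drop i).drop q = [] := by
        rw [hdropeq]; exact List.drop_eq_nil_of_le h
      rw [hz] at hpre
      exact hp (List.prefix_nil.mp hpre)
    have hmem : (i + q) ∈ occList text pat :=
      mem_occList.mpr ⟨hlen, by rw [← hdropeq]; exact hpre⟩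
    have hminmem : ∀ p ∈ (occList text pat).filter (fun p => i ≤ p), i + q ≤ p := by
      intro p hpmem
      rw [List.mem_filter] at hpmem
      obtain ⟨hpo, hip⟩ := hpmem
      have hile : i ≤ p := by simpa using hip
      obtain ⟨_, hpre'⟩ := mem_occList.mp hpo
      by_contra h
      have hlt : p - i < q := by omega
      refine hmin (p - i) hlt ?_
      rw [List.drop_drop, show i + (p - i) = p from by omega]; exact hpre'
    have hmemf : (i + q) ∈ (occList text pat).filter (fun p => i ≤ p) := by
      rw [List.mem_filter]; exact ⟨hmem, by simp⟩
    obtain ⟨t, ht⟩ := head_of_min ((occList_pairwise text pat).filter _) hmemf hminmem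
    rw [hq, ht]
    show (q : Int) = ((i + q : Nat) : Int) - (i : Int)
    push_cast; ring

-- filter by a larger lower bound after a smaller one
theorem filter_le_le {l : List Nat} {i i' : Nat} (h : i ≤ i') :
    (l.filter (fun p => i ≤ p)).filter (fun p => i' ≤ p) = l.filter (fun p => i' ≤ p) := by
  rw [List.filter_filter]
  apply List.filter_congr
  intro p _
  by_cases h2 : i' ≤ p
  · simp [h2, le_trans h h2]
  · simp [h2]

-- The two loops agree: A's find-driven walk from index i equals B's walk over any begins list bs
-- that still contains every begin-occurrence ≥ i, with "".join(out) as B's accumulated string.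
theorem loop_agree (text begin_ end_ repl : List Char)
    (hb : begin_ ≠ []) (he : end_ ≠ []) :
    ∀ (bs : List Nat) (fuel i : Nat) (out : List (List Char)),
      i ≤ text.length → bs.length + 1 ≤ fuel →
      (occList text begin_).filter (fun p => i ≤ p) = bs.filter (fun p => i ≤ p) →
      stripALoop text begin_ end_ repl fuel i out
        = stripBGo text end_ repl (occList text end_) bs i (PySem.Chars.join [] out) := by
  intro bs
  induction bs with
  | nil =>
    intro fuel i out hi hfuel hocc
    obtain ⟨f, rfl⟩ : ∃ f, fuel = f + 1 := ⟨fuel - 1, by omega⟩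
    simp only [stripALoop, stripBGo]
    rw [PySem.Chars.findFrom_natCast text begin_ i hi, find_occ text begin_ hb i, hocc]
    simp [joinNil_eq_flatten, PySem.List.slice_from_natCast]
  | cons j bs ih =>
    intro fuel i out hi hfuel hocc
    obtain ⟨f, rfl⟩ : ∃ f, fuel = f + 1 := ⟨fuel - 1, by omega⟩
    simp only [stripALoop, stripBGo]
    by_cases hji : j < i
    · -- B skips j; A's filtered view is unchanged
      rw [if_pos hji]
      have hocc' : (occList text begin_).filter (fun p => i ≤ p) = bs.filter (fun p => i ≤ p) := by
        rw [hocc, List.filter_cons_of_neg (by simpa using hji)]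
      have := ih (f + 1) i out hi (by simp only [List.length_cons] at hfuel; omega) hocc'
      simp only [stripALoop] at this
      exact this
    · rw [if_neg hji]
      push_neg at hji
      have hocc' : (occList text begin_).filter (fun p => i ≤ p) = j :: bs.filter (fun p => i ≤ p) := by
        rw [hocc, List.filter_cons_of_pos (by simpa using hji)]
      have hfind := find_occ text begin_ hb i
      rw [hocc'] at hfind
      simp only at hfind
      have hjmem : j ∈ occList text begin_ := by
        have : j ∈ (occList text begin_).filter (fun p => i ≤ p) := by
          rw [hocc']; exact List.mem_cons_self
        exact (List.mem_filter.mp this).1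
      have hjlen : j < text.length := (mem_occList.mp hjmem).1
      rw [PySem.Chars.findFrom_natCast text begin_ i hi, hfind]
      have hne : ¬ ((j : Int) - i = -1) := by omega
      rw [if_neg hne]
      have hcollapse : (i : Int) + ((j : Int) - i) = ((j : Nat) : Int) := by omega
      have hne2 : ¬ ((i : Int) + ((j : Int) - i) = -1) := by omega
      rw [if_neg hne2, hcollapse,
          PySem.Chars.findFrom_natCast text end_ j (by omega),
          find_occ text end_ he j]
      cases hends : (occList text end_).filter (fun k => j ≤ k) with
      | nil => simp
      | cons k t =>
        have hkmem : k ∈ (occList text end_).filter (fun k => j ≤ k) := by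
          rw [hends]; exact List.mem_cons_self
        rw [List.mem_filter] at hkmem
        have hjk : j ≤ k := by simpa using hkmem.2
        obtain ⟨hklen, hkpre⟩ := mem_occList.mp hkmem.1
        have hklen' : k + end_.length ≤ text.length := by
          rcases hkpre with ⟨s, hs⟩
          have := congrArg List.length hs; simp at this; omega
        simp only
        have hne3 : ¬ ((k : Int) - j = -1) := by omega
        have hne4 : ¬ ((j : Int) + ((k : Int) - j) = -1) := by omega
        rw [if_neg hne3, if_neg hne4]
        have hcoll2 : (j : Int) + ((k : Int) - j) = ((k : Nat) : Int) := by omega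
        rw [hcoll2]
        have htoNat : ((k : Nat) : Int).toNat = k := by omega
        rw [htoNat]
        have hi' : k + end_.length ≤ text.length := hklen'
        have hend1 : 1 ≤ end_.length := by cases end_; simp at he; simp
        have hocc'' : (occList text begin_).filter (fun p => k + end_.length ≤ p)
            = bs.filter (fun p => k + end_.length ≤ p) := by
          have h1 : i ≤ k + end_.length := by omega
          calc (occList text begin_).filter (fun p => k + end_.length ≤ p)
              = (((occList text begin_).filter (fun p => i ≤ p)).filter (fun p => k + end_.length ≤ p)) :=
                (filter_le_le h1).symm
            _ = ((j :: bs.filter (fun p => i ≤ p)).filter (fun p => k + end_.length ≤ p)) := by rw [hocc']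
            _ = ((bs.filter (fun p => i ≤ p)).filter (fun p => k + end_.length ≤ p)) := by
                rw [List.filter_cons_of_neg (by simp; omega)]
            _ = bs.filter (fun p => k + end_.length ≤ p) := filter_le_le h1
        have := ih f (k + end_.length)
          (out ++ [PySem.List.slice text (some (i : Int)) (some ((j : Nat) : Int))] ++ [repl])
          hi' (by simp only [List.length_cons] at hfuel; omega) hocc''
        rw [this]
        congr 1
        rw [joinNil_eq_flatten, joinNil_eq_flatten]
        simp

-- ===== VERDICT (by name: the statement is the Claim_ definition above) =====
theorem strip_environment_spec : Claim_equal_strip_environment := by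
  intro text env replacement _ _
  unfold Spec_strip_environment strip_environment strip_environment_alt
  have hocclen : (occList text.toList ("\\begin{".toList ++ env.toList ++ ['}'])).length
      ≤ text.toList.length := by
    have := List.length_filter_le
      (fun p => PySem.Chars.startswith (text.toList.drop p) ("\\begin{".toList ++ env.toList ++ ['}']))
      (List.range text.toList.length)
    simpa [occList] using this
  have h := loop_agree text.toList ("\\begin{".toList ++ env.toList ++ ['}'])
      ("\\end{".toList ++ env.toList ++ ['}']) replacement.toList
      (by simp) (by simp)
      (occList text.toList ("\\begin{".toList ++ env.toList ++ ['}']))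
      (text.toList.length + 1) 0 [] (by omega) (by omega) rfl
  rw [PySem.Chars.join_nil] at h
  exact congrArg String.mk h
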